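-- pv_equiv track=rewrite | github.com/npatwari/tx_rx_processing | qpsk_tx_rx.py | text2bits
-- ===== SOURCE A (Python) =====
-- def text2bits(message):
--     # Convert to characters of '1' and '0' in a vector.
--     temp_message = []
--     final_message = []
--     for each in message:
--         temp_message.append(format(ord(each), '07b'))
--     for every in temp_message:
--         for digit in every:
--             final_message.append(int(digit))
--     return final_message
-- ===== SOURCE B (Python) =====
-- def text2bits(message):
--     bits = []
--     for c in message:
--         n = ord(c)
--         width = max(7, n.bit_length())
--         for i in range(width - 1, -1, -1):
--             bits.append((n >> i) & 1)
--     return bits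
-- ===== Notes on version B (the rewrite author's own statement) =====
-- stated objective: alternative
-- what changed: Replaces the two-pass build-binary-strings-then-parse-digits approach with a single pass that extracts each character's bits arithmetically via shifts and masks (width = max(7, bit_length)).
import Mathlib
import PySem

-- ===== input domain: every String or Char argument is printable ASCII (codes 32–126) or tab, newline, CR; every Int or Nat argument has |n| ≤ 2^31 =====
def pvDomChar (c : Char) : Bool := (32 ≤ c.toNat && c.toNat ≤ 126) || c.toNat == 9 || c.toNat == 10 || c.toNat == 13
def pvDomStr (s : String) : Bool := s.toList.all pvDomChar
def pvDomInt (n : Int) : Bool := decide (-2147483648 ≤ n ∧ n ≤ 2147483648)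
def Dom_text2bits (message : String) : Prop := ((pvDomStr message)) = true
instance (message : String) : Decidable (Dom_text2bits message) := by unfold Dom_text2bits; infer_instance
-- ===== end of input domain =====

-- B replaces A's build-binary-strings-then-parse-digits two-pass scheme with one pass of
-- arithmetic bit extraction (shifts and masks); alternative decomposition, same cost.


-- ===== PORT A =====
-- binary digits of n (most significant first), as format(n,'b') produces
def pvBinDigits (n : Nat) : List Char :=
  (Nat.toDigits 2 n)

-- format(n, '07b'): zero-pad on the left to width 7
def pvFormat07b (n : Nat) : List Char :=
  List.replicate (7 - (pvBinDigits n).length) '0' ++ pvBinDigits n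

def text2bits (message : String) : List Int :=
  -- first loop: temp_message.append(format(ord(each),'07b'))
  let temp_message := message.toList.foldl (fun acc each => acc ++ [pvFormat07b each.toNat]) []
  -- second loop: for every in temp_message: for digit in every: final_message.append(int(digit))
  temp_message.foldl (fun acc every =>
    every.foldl (fun acc2 digit => acc2 ++ [((digit.toNat : Int) - 48)]) acc) []

-- ===== PORT B =====
def text2bits_alt (message : String) : List Int :=
  message.toList.foldl (fun bits c =>
    let n : Nat := c.toNat
    let width : Nat := max 7 n.size    -- Nat.size = Python's n.bit_length() for n ≥ 0
    bits ++ (PySem.List.pyRange ((width : Int) - 1) (-1) (-1)).foldl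
      (fun acc i => acc ++ [(((n >>> i.toNat) &&& 1 : Nat) : Int)]) []) bits0
where bits0 : List Int := []

-- ===== PRECONDITION & SPEC =====
def Spec_text2bits (message : String) (out : List Int) : Prop := out = text2bits_alt message
instance (message : String) (out : List Int) : Decidable (Spec_text2bits message out) := by unfold Spec_text2bits; infer_instance

-- ===== CLAIM (what is proved, stated in full; the proofs are below) =====
def Claim_equal_text2bits : Prop := ∀ (message : String), Dom_text2bits message → Spec_text2bits message (text2bits message)

-- ===== LEMMAS AND PROOFS =====
-- per-character chunks
def chunkA (n : Nat) : List Int := (pvFormat07b n).map (fun d => ((d.toNat : Int) - 48))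
def chunkB (n : Nat) : List Int :=
  (PySem.List.pyRange ((max 7 n.size : Nat) - 1) (-1) (-1)).foldl
    (fun acc i => acc ++ [(((n >>> i.toNat) &&& 1 : Nat) : Int)]) []

lemma chunk_eq : ∀ n : Nat, n < 127 → chunkA n = chunkB n := by decide

lemma foldl_append_singleton {α β : Type} (f : α → β) :
    ∀ (l : List α) (acc : List β), l.foldl (fun a x => a ++ [f x]) acc = acc ++ l.map f := by
  intro l
  induction l with
  | nil => simp
  | cons x xs ih => intro acc; simp [List.foldl, ih]

lemma textB_eq : ∀ (l : List Char) (acc : List Int),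
    l.foldl (fun acc c => acc ++ chunkB c.toNat) acc = acc ++ l.flatMap (fun c => chunkB c.toNat) := by
  intro l
  induction l with
  | nil => simp
  | cons c cs ih => intro acc; simp [List.foldl, ih, List.flatMap_cons]

lemma foldl_map_flat (l : List Char) (acc : List Int) :
    (l.map (fun c : Char => pvFormat07b c.toNat)).foldl
      (fun acc every => acc ++ every.map (fun d => ((d.toNat : Int) - 48))) acc
    = acc ++ l.flatMap (fun c => chunkA c.toNat) := by
  induction l generalizing acc with
  | nil => simp
  | cons c cs ih => simp [ih, chunkA, List.flatMap_cons]

lemma text2bits_flat (message : String) :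
    text2bits message = message.toList.flatMap (fun c => chunkA c.toNat) := by
  unfold text2bits
  rw [foldl_append_singleton (fun each : Char => pvFormat07b each.toNat) message.toList []]
  rw [show (fun (acc : List Int) (every : List Char) =>
        every.foldl (fun acc2 digit => acc2 ++ [((digit.toNat : Int) - 48)]) acc)
      = (fun acc every => acc ++ every.map (fun d => ((d.toNat : Int) - 48))) from
    funext fun acc => funext fun every => foldl_append_singleton _ every acc]
  simpa using foldl_map_flat message.toList []

lemma text2bits_alt_flat (message : String) :
    text2bits_alt message = message.toList.flatMap (fun c => chunkB c.toNat) := by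
  unfold text2bits_alt text2bits_alt.bits0
  exact textB_eq message.toList []

theorem text2bits_spec : Claim_equal_text2bits := by
  intro message hdom
  unfold Spec_text2bits
  rw [text2bits_flat, text2bits_alt_flat]
  apply List.flatMap_congr
  intro c hc
  have hdc : pvDomChar c = true := by
    have := List.all_eq_true.mp hdom c hc
    simpa using this
  have h127 : c.toNat < 127 := by
    unfold pvDomChar at hdc
    simp only [Bool.or_eq_true, Bool.and_eq_true, decide_eq_true_eq, beq_iff_eq] at hdc
    omega
  exact chunk_eq c.toNat h127
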